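-- pv_equiv track=rewrite | github.com/frgmt0/pearl | src/utils/fen.py | get_material_difference
-- ===== SOURCE A (Python) =====
-- def get_piece_count(fen):
--     """
--     Count the number of pieces for each type in a position.
--
--     Args:
--         fen: FEN string
--
--     Returns:
--         Dictionary with piece counts
--     """
--     # Extract the piece placement part of the FEN
--     placement = fen.split(' ')[0]
--
--     # Count pieces
--     counts = {
--         'P': 0, 'N': 0, 'B': 0, 'R': 0, 'Q': 0, 'K': 0,
--         'p': 0, 'n': 0, 'b': 0, 'r': 0, 'q': 0, 'k': 0
--     }
--
--     for char in placement:
--         if char in counts: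
--             counts[char] += 1
--
--     return counts
--
-- def get_material_difference(fen):
--     """
--     Calculate the material difference in a position.
--
--     Args:
--         fen: FEN string
--
--     Returns:
--         Material difference in centipawns (positive for white advantage)
--     """
--     # Piece values
--     values = {
--         'P': 100, 'N': 320, 'B': 330, 'R': 500, 'Q': 900, 'K': 0,
--         'p': -100, 'n': -320, 'b': -330, 'r': -500, 'q': -900, 'k': 0
--     }
--
--     # Get piece counts
--     counts = get_piece_count(fen)
--
--     # Calculate material difference
--     material_diff = 0
--     for piece, count in counts.items():
--         material_diff += values[piece] * count
--
--     return material_diff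
-- ===== SOURCE B (Python) =====
-- def get_material_difference(fen):
--     values = {
--         'P': 100, 'N': 320, 'B': 330, 'R': 500, 'Q': 900, 'K': 0,
--         'p': -100, 'n': -320, 'b': -330, 'r': -500, 'q': -900, 'k': 0
--     }
--     return sum(values.get(c, 0) for c in fen.split(' ')[0])
-- ===== Notes on version B (the rewrite author's own statement) =====
-- stated objective: simpler
-- what changed: B drops the intermediate 12-key piece-count dictionary and the count-then-weight two-pass structure, summing piece values directly in a single fused pass over the placement field with values.get(c, 0).
import Mathlib
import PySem

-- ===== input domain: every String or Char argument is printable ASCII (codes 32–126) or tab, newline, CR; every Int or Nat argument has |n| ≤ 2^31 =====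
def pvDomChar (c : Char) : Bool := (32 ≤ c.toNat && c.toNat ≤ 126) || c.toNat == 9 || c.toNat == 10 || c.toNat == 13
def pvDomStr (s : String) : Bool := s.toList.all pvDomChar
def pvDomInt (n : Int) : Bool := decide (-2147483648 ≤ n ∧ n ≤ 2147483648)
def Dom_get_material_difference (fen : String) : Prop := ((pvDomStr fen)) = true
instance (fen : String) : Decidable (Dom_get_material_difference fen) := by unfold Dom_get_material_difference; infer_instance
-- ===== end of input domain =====

-- B fuses A's count-then-weight two passes (12-key counts dict, then a weighted sum over its
-- items) into one direct pass summing per-character piece values; objective: simpler.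

-- ===== PORT A =====
-- counts = {'P': 0, …, 'k': 0}
def pvCountsInit : PySem.Dict Char Int :=
  PySem.Dict.ofList [('P', 0), ('N', 0), ('B', 0), ('R', 0), ('Q', 0), ('K', 0),
                     ('p', 0), ('n', 0), ('b', 0), ('r', 0), ('q', 0), ('k', 0)]

-- get_piece_count: placement = fen.split(' ')[0]; then count chars that are keys.
-- fen.split(' ') with a nonempty separator is total and never returns an empty list,
-- so the [0] indexing is exact via headD.
def get_piece_count (fen : String) : PySem.Dict Char Int :=
  let placement := (((PySem.Str.split? fen " ").getD []).headD "")
  placement.toList.foldl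
    (fun counts ch => if counts.contains ch then counts.modify ch 0 (· + 1) else counts)
    pvCountsInit

-- values = {'P': 100, …, 'k': 0}  (A's loop reads values[piece]; every key of counts is a
-- key of values, so getD 0 is exact)
def pvValuesA : PySem.Dict Char Int :=
  PySem.Dict.ofList [('P', 100), ('N', 320), ('B', 330), ('R', 500), ('Q', 900), ('K', 0),
                     ('p', -100), ('n', -320), ('b', -330), ('r', -500), ('q', -900), ('k', 0)]

def get_material_difference (fen : String) : Int :=
  (get_piece_count fen).items.foldl
    (fun material_diff pc => material_diff + pvValuesA.getD pc.1 0 * pc.2) 0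

-- ===== PORT B =====
def pvValuesB : PySem.Dict Char Int :=
  PySem.Dict.ofList [('P', 100), ('N', 320), ('B', 330), ('R', 500), ('Q', 900), ('K', 0),
                     ('p', -100), ('n', -320), ('b', -330), ('r', -500), ('q', -900), ('k', 0)]

def get_material_difference_alt (fen : String) : Int :=
  ((((PySem.Str.split? fen " ").getD []).headD "").toList.map
    (fun c => pvValuesB.getD c 0)).sum

-- ===== PRECONDITION & SPEC =====
def Spec_get_material_difference (fen : String) (out : Int) : Prop := out = get_material_difference_alt fen
instance (fen : String) (out : Int) : Decidable (Spec_get_material_difference fen out) := by unfold Spec_get_material_difference; infer_instance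

-- ===== CLAIM (what is proved, stated in full; the proofs are below) =====
def Claim_equal_get_material_difference : Prop := ∀ (fen : String), Dom_get_material_difference fen → Spec_get_material_difference fen (get_material_difference fen)

-- ===== LEMMAS AND PROOFS =====

-- one step of A's counting loop
def pvStep (d : PySem.Dict Char Int) (c : Char) : PySem.Dict Char Int :=
  if d.contains c then d.modify c 0 (· + 1) else d

lemma pv_keys_step (d : PySem.Dict Char Int) (c : Char) : (pvStep d c).keys = d.keys := by
  unfold pvStep
  split_ifs with h
  · rw [PySem.Dict.keys_modify, PySem.Dict.keys_insert_of_contains _ _ h]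
  · rfl

lemma pv_keys_fold (l : List Char) (d : PySem.Dict Char Int) :
    (l.foldl pvStep d).keys = d.keys := by
  induction l generalizing d with
  | nil => rfl
  | cons c t ih => simp only [List.foldl_cons]; rw [ih, pv_keys_step]

lemma pv_contains_step (d : PySem.Dict Char Int) (c k : Char) :
    (pvStep d c).contains k = d.contains k := by
  rw [PySem.Dict.contains_eq_decide_mem_keys, PySem.Dict.contains_eq_decide_mem_keys,
    pv_keys_step]

lemma pv_getD_fold (l : List Char) (d : PySem.Dict Char Int) (k : Char) :
    (l.foldl pvStep d).getD k 0 =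
      d.getD k 0 + (if d.contains k then (l.count k : Int) else 0) := by
  induction l generalizing d with
  | nil => simp
  | cons c t ih =>
    simp only [List.foldl_cons]
    rw [ih, pv_contains_step]
    unfold pvStep
    by_cases hc : d.contains c = true
    · simp only [hc, if_true]
      rw [PySem.Dict.getD_modify]
      by_cases hk : d.contains k = true
      · simp only [hk, if_true]
        by_cases he : k = c
        · subst he; simp; ring
        · simp [he, Ne.symm he]
      · simp only [Bool.not_eq_true] at hk
        have hne : ¬ (k = c) := by rintro rfl; rw [hk] at hc; cases hc
        simp [hk, hne]
    · simp only [Bool.not_eq_true] at hc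
      simp only [hc, Bool.false_eq_true, if_false]
      by_cases hk : d.contains k = true
      · have hne : k ≠ c := by rintro rfl; rw [hk] at hc; cases hc
        simp [hk, Ne.symm hne]
      · simp only [Bool.not_eq_true] at hk
        simp [hk]

lemma pv_keys_init : pvCountsInit.keys =
    ['P', 'N', 'B', 'R', 'Q', 'K', 'p', 'n', 'b', 'r', 'q', 'k'] := by decide

lemma pv_init_getD (k : Char) : pvCountsInit.getD k 0 = 0 := by
  by_cases hk : pvCountsInit.contains k = true
  · rw [PySem.Dict.contains_eq_decide_mem_keys, pv_keys_init] at hk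
    simp only [decide_eq_true_eq, List.mem_cons, List.not_mem_nil, or_false] at hk
    rcases hk with rfl|rfl|rfl|rfl|rfl|rfl|rfl|rfl|rfl|rfl|rfl|rfl <;> decide
  · simp only [Bool.not_eq_true] at hk
    exact PySem.Dict.getD_of_not_contains _ _ hk

-- Σ over the 12 keys of value * (1 if key = c else 0) = B's per-character value
lemma pv_single (c : Char) :
    (['P', 'N', 'B', 'R', 'Q', 'K', 'p', 'n', 'b', 'r', 'q', 'k'].map
      (fun k => pvValuesA.getD k 0 * (if c = k then (1:Int) else 0))).sum
      = pvValuesB.getD c 0 := by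
  by_cases h1 : c = 'P'; · subst h1; decide
  by_cases h2 : c = 'N'; · subst h2; decide
  by_cases h3 : c = 'B'; · subst h3; decide
  by_cases h4 : c = 'R'; · subst h4; decide
  by_cases h5 : c = 'Q'; · subst h5; decide
  by_cases h6 : c = 'K'; · subst h6; decide
  by_cases h7 : c = 'p'; · subst h7; decide
  by_cases h8 : c = 'n'; · subst h8; decide
  by_cases h9 : c = 'b'; · subst h9; decide
  by_cases h10 : c = 'r'; · subst h10; decide
  by_cases h11 : c = 'q'; · subst h11; decide
  by_cases h12 : c = 'k'; · subst h12; decide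
  have hnc : pvValuesB.contains c = false := by
    rw [PySem.Dict.contains_eq_decide_mem_keys]
    have : pvValuesB.keys = ['P', 'N', 'B', 'R', 'Q', 'K', 'p', 'n', 'b', 'r', 'q', 'k'] := by
      decide
    rw [this]
    simp [h1, h2, h3, h4, h5, h6, h7, h8, h9, h10, h11, h12]
  rw [PySem.Dict.getD_of_not_contains _ _ hnc]
  simp [h1, h2, h3, h4, h5, h6, h7, h8, h9, h10, h11, h12]

-- main bridge: A's weighted count-sum over the 12 keys equals B's direct per-char sum
lemma pv_bridge (l : List Char) :
    (['P', 'N', 'B', 'R', 'Q', 'K', 'p', 'n', 'b', 'r', 'q', 'k'].map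
      (fun k => pvValuesA.getD k 0 * (l.count k : Int))).sum
      = (l.map (fun c => pvValuesB.getD c 0)).sum := by
  induction l with
  | nil => decide
  | cons c t ih =>
    have hsplit : ∀ k : Char,
        pvValuesA.getD k 0 * (((c :: t).count k : Int))
        = pvValuesA.getD k 0 * (t.count k : Int)
          + pvValuesA.getD k 0 * (if c = k then (1:Int) else 0) := by
      intro k
      by_cases he : c = k
      · subst he; simp; ring
      · simp [he]
    calc (['P', 'N', 'B', 'R', 'Q', 'K', 'p', 'n', 'b', 'r', 'q', 'k'].map
          (fun k => pvValuesA.getD k 0 * ((c :: t).count k : Int))).sum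
        = (['P', 'N', 'B', 'R', 'Q', 'K', 'p', 'n', 'b', 'r', 'q', 'k'].map
            (fun k => pvValuesA.getD k 0 * (t.count k : Int)
              + pvValuesA.getD k 0 * (if c = k then (1:Int) else 0))).sum := by
          simp only [hsplit]
      _ = (['P', 'N', 'B', 'R', 'Q', 'K', 'p', 'n', 'b', 'r', 'q', 'k'].map
            (fun k => pvValuesA.getD k 0 * (t.count k : Int))).sum
          + (['P', 'N', 'B', 'R', 'Q', 'K', 'p', 'n', 'b', 'r', 'q', 'k'].map
            (fun k => pvValuesA.getD k 0 * (if c = k then (1:Int) else 0))).sum := by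
          rw [PySem.List.sum_map_add_int]
      _ = ((c :: t).map (fun c => pvValuesB.getD c 0)).sum := by
          rw [ih, pv_single]; simp [add_comm]

theorem pv_main (fen : String) :
    get_material_difference fen = get_material_difference_alt fen := by
  unfold get_material_difference get_material_difference_alt get_piece_count
  set l := (((PySem.Str.split? fen " ").getD []).headD "").toList with hl
  have hkeys : (l.foldl pvStep pvCountsInit).keys =
      ['P', 'N', 'B', 'R', 'Q', 'K', 'p', 'n', 'b', 'r', 'q', 'k'] := by
    rw [pv_keys_fold, pv_keys_init]
  have hnd : (l.foldl pvStep pvCountsInit).keys.Nodup := by rw [hkeys]; decide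
  have hitems := PySem.Dict.items_eq_map_keys (l.foldl pvStep pvCountsInit) hnd (0 : Int)
  show (l.foldl pvStep pvCountsInit).items.foldl
      (fun material_diff pc => material_diff + pvValuesA.getD pc.1 0 * pc.2) 0
    = (l.map (fun c => pvValuesB.getD c 0)).sum
  have h1 : List.foldl (fun material_diff pc => material_diff + pvValuesA.getD pc.1 0 * pc.2) 0
      (l.foldl pvStep pvCountsInit).items
      = ((l.foldl pvStep pvCountsInit).items.map (fun pc => pvValuesA.getD pc.1 0 * pc.2)).sum + 0 := by
    have h := PySem.List.foldl_add ((l.foldl pvStep pvCountsInit).items)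
      (fun pc => pvValuesA.getD pc.1 0 * pc.2) 0
    simpa using h
  rw [h1, hitems, hkeys, List.map_map, add_zero]
  rw [← pv_bridge l]
  apply congrArg
  apply List.map_congr_left
  intro k hk
  have hck : pvCountsInit.contains k = true := by
    rw [PySem.Dict.contains_eq_decide_mem_keys, pv_keys_init]
    simpa using hk
  simp only [Function.comp_apply]
  rw [pv_getD_fold, pv_init_getD, hck]; simp

-- ===== VERDICT (by name: the statement is the Claim_ definition above) =====
theorem get_material_difference_spec : Claim_equal_get_material_difference := by
  intro fen _
  unfold Spec_get_material_difference
  exact pv_main fen
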